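-- pv_equiv track=rewrite | github.com/Sbozzolo/motionpicture | motionpicture/moviemaker.py | select_frames
-- ===== SOURCE A (Python) =====
-- def select_frames(frame_list, frame_min=None, frame_max=None, frame_every=1):
--     """Select a subset of frames among the given list.
--
--     :param frame_list: List of all the possible frames.
--     :type frame_list: list
--
--     :param frame_min: Minimum frame to render.
--     :type frame_min: int, float
--
--     :param frame_max: Maximum frame to render.
--     :type frame_max: int, float
--
--     :param frame_every: Render one frame every frame_every.
--     :type frame_every: int
--
--     :returns: Frames that satisfy the condition frame_min <= frame <= frame_max
--               and one every frame_every.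
--     :rtype: list
--
--     """
--     # We deduce the type of snapshot from frames. We need it because we need to cast the
--     # argparse strings to something that can compared with >=<
--     type_frames = type(frame_list[0])
--     if not all(isinstance(elem, type_frames) for elem in frame_list):
--         raise RuntimeError(
--             "MOPIMoive.get_frames does not return frames with a homogeneous type"
--         )
--
--     if frame_min is None:
--         frame_min = min(frame_list)
--     else:
--         frame_min = type_frames(frame_min)
--
--     if frame_max is None:
--         frame_max = max(frame_list)
--     else:
--         frame_max = type_frames(frame_max)
--
--     # First we select the frames that are within frame_min and frame_max, then
--     # among these we take one every N. We do this in two step to ensure that the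
--     # one every N is done on the restricted set of frames.
--     out_frames = [frame for frame in frame_list if frame_min <= frame <= frame_max]
--     return [frame for num, frame in enumerate(out_frames) if num % int(frame_every) == 0]
-- ===== SOURCE B (Python) =====
-- def select_frames(frame_list, frame_min=None, frame_max=None, frame_every=1):
--     """Select frames in [frame_min, frame_max], one every frame_every.
--
--     Decimation by skipping: after emitting an in-range frame, drop the next
--     abs(int(frame_every)) - 1 in-range frames, then emit again.  No enumerate,
--     no modulo, no intermediate filtered list.
--     """
--     type_frames = type(frame_list[0])
--     if not all(isinstance(elem, type_frames) for elem in frame_list):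
--         raise RuntimeError(
--             "MOPIMoive.get_frames does not return frames with a homogeneous type"
--         )
--
--     lo = min(frame_list) if frame_min is None else type_frames(frame_min)
--     hi = max(frame_list) if frame_max is None else type_frames(frame_max)
--     gap = abs(int(frame_every))  # num % frame_every == 0 (num >= 0) iff abs divides num
--
--     result = []
--     skip = 0  # in-range frames still to drop before the next pick
--     for frame in frame_list:
--         if lo <= frame <= hi:
--             if skip == 0:
--                 result.append(frame)
--                 skip = gap
--             skip -= 1
--     return result
-- ===== Notes on version B (the rewrite author's own statement) =====
-- stated objective: alternative
-- what changed: Replaces A's filter-to-intermediate-list plus enumerate-and-modulo stride comprehension by a decimation loop: emit an in-range frame, then skip the next |frame_every|-1 in-range frames via a countdown, with no enumerate, no modulo test and no intermediate list.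
-- outside the precondition, e.g. on select_frames([], None, None, 1): A raises IndexError, B raises IndexError; on select_frames([0], 1, None, 0): A returns [], B returns []
import Mathlib
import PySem

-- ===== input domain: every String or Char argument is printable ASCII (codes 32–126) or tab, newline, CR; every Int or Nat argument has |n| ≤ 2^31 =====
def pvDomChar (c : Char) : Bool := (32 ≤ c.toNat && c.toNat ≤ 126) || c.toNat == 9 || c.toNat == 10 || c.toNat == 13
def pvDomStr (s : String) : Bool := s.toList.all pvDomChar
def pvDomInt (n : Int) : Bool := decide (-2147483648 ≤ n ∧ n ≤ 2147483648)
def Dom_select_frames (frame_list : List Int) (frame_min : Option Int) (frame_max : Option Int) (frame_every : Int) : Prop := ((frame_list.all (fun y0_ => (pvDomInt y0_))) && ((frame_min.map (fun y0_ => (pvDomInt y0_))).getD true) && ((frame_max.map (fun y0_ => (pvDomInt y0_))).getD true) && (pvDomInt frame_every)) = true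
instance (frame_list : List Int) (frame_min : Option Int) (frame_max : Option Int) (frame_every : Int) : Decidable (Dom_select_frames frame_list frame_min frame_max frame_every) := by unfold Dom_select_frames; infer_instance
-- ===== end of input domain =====

-- B replaces A's filter-then-(enumerate + modulo)-stride pair of comprehensions by a
-- decimation loop: emit an in-range frame, then skip the next |frame_every|-1 in-range
-- frames with a countdown; no enumerate, no modulo, no intermediate list. Same cost.

-- ===== PORT A =====
-- A's homogeneity check `all(isinstance(elem, type_frames) ...)` is vacuously true for a
-- List Int (and the int(...) casts are identities on Int), so it is omitted here.
def select_frames (frame_list : List Int) (frame_min : Option Int) (frame_max : Option Int) (frame_every : Int) : List Int :=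
  let lo := match frame_min with
    | none => (PySem.List.min? frame_list (fun y => y)).getD 0   -- min(frame_list); empty list excluded by Pre_
    | some v => v
  let hi := match frame_max with
    | none => (PySem.List.max? frame_list (fun y => y)).getD 0
    | some v => v
  let out_frames := frame_list.filter (fun f => decide (lo ≤ f) && decide (f ≤ hi))
  ((PySem.List.enumerate out_frames).filter (fun p => PySem.Int.mod p.1 frame_every == 0)).map (·.2)

-- ===== PORT B =====
-- the decimation loop of Source B: skip counts the in-range frames still to drop
def selAltGo (lo hi gap : Int) (xs : List Int) (skip : Int) : List Int :=
  match xs with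
  | [] => []
  | f :: rest =>
    if lo ≤ f ∧ f ≤ hi then
      if skip = 0 then f :: selAltGo lo hi gap rest (gap - 1)
      else selAltGo lo hi gap rest (skip - 1)
    else selAltGo lo hi gap rest skip

def select_frames_alt (frame_list : List Int) (frame_min : Option Int) (frame_max : Option Int) (frame_every : Int) : List Int :=
  let lo := match frame_min with
    | none => (PySem.List.min? frame_list (fun y => y)).getD 0
    | some v => v
  let hi := match frame_max with
    | none => (PySem.List.max? frame_list (fun y => y)).getD 0
    | some v => v
  selAltGo lo hi |frame_every| frame_list 0

-- ===== PRECONDITION & SPEC =====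
-- Pre_ excludes the empty list (A raises IndexError at frame_list[0]) and frame_every = 0
-- (Python raises ZeroDivisionError at `num % 0` whenever some frame is in range; the
-- fe = 0 inputs with no in-range frame, where A returns [], are excluded with it — cited).
def Pre_select_frames (frame_list : List Int) (frame_min : Option Int) (frame_max : Option Int) (frame_every : Int) : Prop :=
  frame_list ≠ [] ∧ frame_every ≠ 0
instance (frame_list : List Int) (frame_min : Option Int) (frame_max : Option Int) (frame_every : Int) : Decidable (Pre_select_frames frame_list frame_min frame_max frame_every) := by unfold Pre_select_frames; infer_instance

def pvWitness_select_frames : List Int × Option Int × Option Int × Int := ([3, 1, 4, 1, 5], some 1, none, 2)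

def Spec_select_frames (frame_list : List Int) (frame_min : Option Int) (frame_max : Option Int) (frame_every : Int) (out : List Int) : Prop := out = select_frames_alt frame_list frame_min frame_max frame_every
instance (frame_list : List Int) (frame_min : Option Int) (frame_max : Option Int) (frame_every : Int) (out : List Int) : Decidable (Spec_select_frames frame_list frame_min frame_max frame_every out) := by unfold Spec_select_frames; infer_instance

-- ===== CLAIM (what is proved, stated in full; the proofs are below) =====
def Claim_equal_select_frames : Prop := ∀ (frame_list : List Int) (frame_min : Option Int) (frame_max : Option Int) (frame_every : Int), Dom_select_frames frame_list frame_min frame_max frame_every → Pre_select_frames frame_list frame_min frame_max frame_every → Spec_select_frames frame_list frame_min frame_max frame_every (select_frames frame_list frame_min frame_max frame_every)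

-- ===== LEMMAS AND PROOFS =====

-- Invariant: B's skip counter s and A's enumeration counter c stay congruent
-- (s ≡ -c mod |fe|, 0 ≤ s < |fe|), so B picks (s = 0) exactly when A's modulo test fires.
theorem selAltGo_eq (lo hi fe : Int) (hfe : fe ≠ 0) (xs : List Int) (s c : Int)
    (hs0 : 0 ≤ s) (hs1 : s < |fe|) (hsc : |fe| ∣ (s + c)) :
    selAltGo lo hi |fe| xs s
      = ((PySem.List.enumerate (xs.filter (fun f => decide (lo ≤ f) && decide (f ≤ hi))) c).filter
          (fun p => PySem.Int.mod p.1 fe == 0)).map (·.2) := by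
  induction xs generalizing s c with
  | nil => simp [selAltGo, PySem.List.enumerate_nil]
  | cons x xs ih =>
    have habs : (0:Int) < |fe| := abs_pos.mpr hfe
    by_cases hx : lo ≤ x ∧ x ≤ hi
    · have h1 : List.filter (fun f => decide (lo ≤ f) && decide (f ≤ hi)) (x :: xs)
          = x :: List.filter (fun f => decide (lo ≤ f) && decide (f ≤ hi)) xs :=
        List.filter_cons_of_pos (by simp [hx.1, hx.2])
      have hmodc : (PySem.Int.mod c fe = 0) ↔ (|fe| ∣ c) := by
        rw [PySem.Int.mod_eq_zero_iff_dvd, abs_dvd]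
      rw [h1, PySem.List.enumerate_cons]
      by_cases hz : s = 0
      · have hdc : |fe| ∣ c := by simpa [hz] using hsc
        have h2 : List.filter (fun p : Int × Int => PySem.Int.mod p.1 fe == 0)
            ((c, x) :: PySem.List.enumerate (List.filter (fun f => decide (lo ≤ f) && decide (f ≤ hi)) xs) (c + 1))
            = (c, x) :: List.filter (fun p : Int × Int => PySem.Int.mod p.1 fe == 0)
                (PySem.List.enumerate (List.filter (fun f => decide (lo ≤ f) && decide (f ≤ hi)) xs) (c + 1)) :=
          List.filter_cons_of_pos (by simpa using hmodc.mpr hdc)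
        rw [h2, List.map_cons, selAltGo, if_pos hx, if_pos hz]
        congr 1
        exact ih (|fe| - 1) (c + 1) (by omega) (by omega)
          (by have : |fe| - 1 + (c + 1) = |fe| + c := by ring
              rw [this]; exact dvd_add (dvd_refl _) hdc)
      · have hndc : ¬ |fe| ∣ c := by
          intro hdc
          have : |fe| ∣ s := (Int.dvd_add_right hdc).mp (by rwa [add_comm] at hsc)
          have := Int.le_of_dvd (by omega) this
          omega
        have h2 : List.filter (fun p : Int × Int => PySem.Int.mod p.1 fe == 0)
            ((c, x) :: PySem.List.enumerate (List.filter (fun f => decide (lo ≤ f) && decide (f ≤ hi)) xs) (c + 1))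
            = List.filter (fun p : Int × Int => PySem.Int.mod p.1 fe == 0)
                (PySem.List.enumerate (List.filter (fun f => decide (lo ≤ f) && decide (f ≤ hi)) xs) (c + 1)) :=
          List.filter_cons_of_neg (by simp [hmodc, hndc])
        rw [h2, selAltGo, if_pos hx, if_neg hz]
        exact ih (s - 1) (c + 1) (by omega) (by omega)
          (by have : s - 1 + (c + 1) = s + c := by ring
              rw [this]; exact hsc)
    · have h1 : List.filter (fun f => decide (lo ≤ f) && decide (f ≤ hi)) (x :: xs)
          = List.filter (fun f => decide (lo ≤ f) && decide (f ≤ hi)) xs :=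
        List.filter_cons_of_neg (by rcases not_and_or.mp hx with h | h <;> simp [h])
      rw [h1, selAltGo, if_neg hx]
      exact ih s c hs0 hs1 hsc

-- ===== VERDICT (by name: the statement is the Claim_ definition above) =====
theorem select_frames_spec : Claim_equal_select_frames := by
  intro frame_list frame_min frame_max frame_every _ hpre
  unfold Spec_select_frames select_frames select_frames_alt
  rw [selAltGo_eq _ _ _ hpre.2 _ 0 0 le_rfl (abs_pos.mpr hpre.2) (by simp)]
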